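-- pv_equiv track=rewrite | github.com/sea-lab-wm/complexity-verification-project | warning_parser.py | getNumTimeoutsPerDataset
-- ===== SOURCE A (Python) =====
-- def getNumTimeoutsPerDataset(timeouts):
--
--     # number of snippets with timeouts
--     counts = {
--         "1": 0,
--         "2": 0,
--         "3": 0,
--         "6": 0,
--         "9": 0,
--         "f": 0
--     }
--
--     timeouts = list(set(timeouts))
--
--     for snippet in timeouts:
--         if f"{snippet.split('--')[0].strip()}" in counts:
--             counts[f"{snippet.split('--')[0].strip()}"] += 1
--
--     return counts
-- ===== SOURCE B (Python) =====
-- def getNumTimeoutsPerDataset(timeouts):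
--     # Loop over the six known dataset keys and rescan the deduplicated
--     # snippets once per key, instead of building the counts in one pass.
--     deduped = list(set(timeouts))
--     return {
--         key: sum(1 for s in deduped if s.split('--')[0].strip() == key)
--         for key in ["1", "2", "3", "6", "9", "f"]
--     }
-- ===== Notes on version B (the rewrite author's own statement) =====
-- stated objective: alternative
-- what changed: Instead of one pass over the deduplicated snippets that increments a pre-zeroed dict, B loops over the six known dataset keys and counts, for each key, the deduplicated snippets whose '--'-prefix equals it (per-key rescan).
import Mathlib
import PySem

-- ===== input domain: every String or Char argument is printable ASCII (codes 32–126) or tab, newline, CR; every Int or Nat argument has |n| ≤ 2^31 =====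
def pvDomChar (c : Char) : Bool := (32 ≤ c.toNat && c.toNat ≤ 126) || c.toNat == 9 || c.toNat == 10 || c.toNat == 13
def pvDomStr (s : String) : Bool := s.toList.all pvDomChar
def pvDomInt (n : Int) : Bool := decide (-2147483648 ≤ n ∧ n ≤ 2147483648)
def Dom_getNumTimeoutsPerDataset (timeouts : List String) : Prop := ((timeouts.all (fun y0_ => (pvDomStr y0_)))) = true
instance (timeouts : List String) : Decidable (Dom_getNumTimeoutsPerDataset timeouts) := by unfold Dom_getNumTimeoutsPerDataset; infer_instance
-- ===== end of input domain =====

-- B replaces A's single counting pass with one scan of the deduplicated input per known key (alternative decomposition, same results).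

-- ===== PORT A =====
-- snippet.split('--')[0].strip()  (split with a nonempty separator is never empty, so [0] never raises)
def pvKey (s : String) : String :=
  PySem.Str.strip (((PySem.Str.split? s "--").getD []).headD "")

def getNumTimeoutsPerDataset (timeouts : List String) : List (String × Int) :=
  let counts : PySem.Dict String Int :=
    (((((PySem.Dict.empty.insert "1" 0).insert "2" 0).insert "3" 0).insert "6" 0).insert "9" 0).insert "f" 0
  let ts : PySem.Set String := PySem.Set.ofList timeouts
  let final := ts.foldl (fun d snippet =>
    if d.contains (pvKey snippet) then d.modify (pvKey snippet) 0 (· + 1) else d) counts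
  final.items

-- ===== PORT B =====
def getNumTimeoutsPerDataset_alt (timeouts : List String) : List (String × Int) :=
  let deduped : PySem.Set String := PySem.Set.ofList timeouts
  ["1", "2", "3", "6", "9", "f"].map (fun key =>
    (key, (deduped.map (fun s => if pvKey s == key then (1 : Int) else 0)).sum))

-- ===== PRECONDITION & SPEC =====
def Spec_getNumTimeoutsPerDataset (timeouts : List String) (out : List (String × Int)) : Prop := out = getNumTimeoutsPerDataset_alt timeouts
instance (timeouts : List String) (out : List (String × Int)) : Decidable (Spec_getNumTimeoutsPerDataset timeouts out) := by unfold Spec_getNumTimeoutsPerDataset; infer_instance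

-- ===== CLAIM (what is proved, stated in full; the proofs are below) =====
def Claim_equal_getNumTimeoutsPerDataset : Prop := ∀ (timeouts : List String), Dom_getNumTimeoutsPerDataset timeouts → Spec_getNumTimeoutsPerDataset timeouts (getNumTimeoutsPerDataset timeouts)

-- ===== LEMMAS AND PROOFS =====

-- the six-key dict with symbolic values
def pvMk (a b c d e f : Int) : PySem.Dict String Int :=
  (((((PySem.Dict.empty.insert "1" a).insert "2" b).insert "3" c).insert "6" d).insert "9" e).insert "f" f

-- count (as Int) of snippets in l whose key is k
def pvCnt (k : String) (l : List String) : Int := (l.countP (fun s => pvKey s == k) : Int)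

lemma pvCnt_nil (k : String) : pvCnt k [] = 0 := rfl

lemma pvCnt_cons (k : String) (s : String) (t : List String) :
    pvCnt k (s :: t) = (if pvKey s == k then (1 : Int) else 0) + pvCnt k t := by
  unfold pvCnt
  rw [List.countP_cons]
  by_cases h : (pvKey s == k)
  · simp [h]; omega
  · simp [h]

lemma pvStep (a b c d e f : Int) (s : String) :
    (if (pvMk a b c d e f).contains (pvKey s) then (pvMk a b c d e f).modify (pvKey s) 0 (· + 1)
     else pvMk a b c d e f)
    = pvMk (a + if pvKey s == "1" then 1 else 0) (b + if pvKey s == "2" then 1 else 0)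
        (c + if pvKey s == "3" then 1 else 0) (d + if pvKey s == "6" then 1 else 0)
        (e + if pvKey s == "9" then 1 else 0) (f + if pvKey s == "f" then 1 else 0) := by
  by_cases h1 : pvKey s = "1"
  · simp [h1, pvMk, PySem.Dict.contains, PySem.Dict.modify, PySem.Dict.insert, PySem.Dict.empty,
      PySem.Dict.getD, PySem.Dict.get?]
  by_cases h2 : pvKey s = "2"
  · simp [h2, pvMk, PySem.Dict.contains, PySem.Dict.modify, PySem.Dict.insert, PySem.Dict.empty,
      PySem.Dict.getD, PySem.Dict.get?]
  by_cases h3 : pvKey s = "3"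
  · simp [h3, pvMk, PySem.Dict.contains, PySem.Dict.modify, PySem.Dict.insert, PySem.Dict.empty,
      PySem.Dict.getD, PySem.Dict.get?]
  by_cases h6 : pvKey s = "6"
  · simp [h6, pvMk, PySem.Dict.contains, PySem.Dict.modify, PySem.Dict.insert, PySem.Dict.empty,
      PySem.Dict.getD, PySem.Dict.get?]
  by_cases h9 : pvKey s = "9"
  · simp [h9, pvMk, PySem.Dict.contains, PySem.Dict.modify, PySem.Dict.insert, PySem.Dict.empty,
      PySem.Dict.getD, PySem.Dict.get?]
  by_cases hf : pvKey s = "f"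
  · simp [hf, pvMk, PySem.Dict.contains, PySem.Dict.modify, PySem.Dict.insert, PySem.Dict.empty,
      PySem.Dict.getD, PySem.Dict.get?]
  · simp [pvMk, PySem.Dict.contains, PySem.Dict.insert, PySem.Dict.empty, h1, h2, h3, h6, h9, hf]
    rintro (h | h | h | h | h | h) <;> simp_all

lemma pvFold_mk (l : List String) (a b c d e f : Int) :
    l.foldl (fun d' snippet =>
      if d'.contains (pvKey snippet) then d'.modify (pvKey snippet) 0 (· + 1) else d') (pvMk a b c d e f)
    = pvMk (a + pvCnt "1" l) (b + pvCnt "2" l) (c + pvCnt "3" l)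
        (d + pvCnt "6" l) (e + pvCnt "9" l) (f + pvCnt "f" l) := by
  induction l generalizing a b c d e f with
  | nil => simp [pvCnt_nil]
  | cons s t ih =>
    rw [List.foldl_cons, pvStep, ih]
    rw [pvCnt_cons, pvCnt_cons, pvCnt_cons, pvCnt_cons, pvCnt_cons, pvCnt_cons]
    ring_nf

lemma pvSum_eq_cnt (k : String) (l : List String) :
    (l.map (fun s => if pvKey s = k then (1 : Int) else 0)).sum = pvCnt k l := by
  induction l with
  | nil => simp [pvCnt_nil]
  | cons s t ih => by_cases h : pvKey s = k <;> simp [h, pvCnt_cons, ih]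

-- ===== VERDICT (by name: the statement is the Claim_ definition above) =====
theorem getNumTimeoutsPerDataset_spec : Claim_equal_getNumTimeoutsPerDataset := by
  intro timeouts _
  unfold Spec_getNumTimeoutsPerDataset getNumTimeoutsPerDataset getNumTimeoutsPerDataset_alt
  show (List.foldl _ (pvMk 0 0 0 0 0 0) _).items = _
  rw [pvFold_mk]
  simp [pvMk, PySem.Dict.insert, PySem.Dict.empty]
  refine ⟨?_, ?_, ?_, ?_, ?_, ?_⟩ <;> exact (pvSum_eq_cnt _ _).symm
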